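-- pv_equiv track=rewrite | github.com/beaudry12087/mobilebert-joint-disfluency-detector-and-parser | test_pytorch_model.py | format_disfluencies
-- ===== SOURCE A (Python) =====
-- def format_disfluencies(disfluencies, merge_consecutive=True):
--     """Format disfluencies for display, optionally merging consecutive markers"""
--     if not merge_consecutive:
--         return ' '.join('[' + word + ']' if is_disf else word
--                        for word, is_disf in disfluencies)
--
--     result = []
--     current_group = []
--     last_was_disf = False
--
--     for i, (word, is_disf) in enumerate(disfluencies):
--         # Always merge if:
--         # 1. Current word is disfluent and we have an active group
--         # 2. Current word is disfluent and previous word was disfluent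
--         # 3. Current word is a filler (um, uh) and near other fillers
--         # 4. Current word is part of a repair sequence
--         if is_disf:
--             if (current_group or last_was_disf or
--                 word.lower().strip(',.!?') in {'um', 'uh'} or
--                 (i > 0 and i < len(disfluencies)-1)):  # Part of sequence
--                 current_group.append(word)
--             else:
--                 if current_group:
--                     result.append(f"[{' '.join(current_group)}]")
--                 current_group = [word]
--             last_was_disf = True
--         else:
--             if current_group:
--                 result.append(f"[{' '.join(current_group)}]")
--                 current_group = []
--             result.append(word)
--             last_was_disf = False
--
--     if current_group:
--         result.append(f"[{' '.join(current_group)}]")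
--
--     return ' '.join(result)
-- ===== SOURCE B (Python) =====
-- def format_disfluencies(disfluencies, merge_consecutive=True):
--     """Format disfluencies for display, optionally merging consecutive markers"""
--     if not merge_consecutive:
--         return ' '.join('[' + word + ']' if is_disf else word
--                         for word, is_disf in disfluencies)
--
--     def pieces(items):
--         # Group maximal runs of disfluent words directly, no carried state.
--         if not items:
--             return []
--         word, is_disf = items[0]
--         if is_disf:
--             run = [w for w, _ in items[1:]]
--             k = 0
--             for _, d in items[1:]:
--                 if not d:
--                     break
--                 k += 1
--             return ['[' + ' '.join([word] + run[:k]) + ']'] + pieces(items[1 + k:])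
--         return [word] + pieces(items[1:])
--
--     return ' '.join(pieces(disfluencies))
-- ===== Notes on version B (the rewrite author's own statement) =====
-- stated objective: simpler
-- what changed: Replaced the indexed state machine (result/current_group/last_was_disf with a four-way merge condition over the enumerate index) by a direct recursive grouping of maximal runs of disfluent words; the condition disappears because its outcome never changes the state.
import Mathlib
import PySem

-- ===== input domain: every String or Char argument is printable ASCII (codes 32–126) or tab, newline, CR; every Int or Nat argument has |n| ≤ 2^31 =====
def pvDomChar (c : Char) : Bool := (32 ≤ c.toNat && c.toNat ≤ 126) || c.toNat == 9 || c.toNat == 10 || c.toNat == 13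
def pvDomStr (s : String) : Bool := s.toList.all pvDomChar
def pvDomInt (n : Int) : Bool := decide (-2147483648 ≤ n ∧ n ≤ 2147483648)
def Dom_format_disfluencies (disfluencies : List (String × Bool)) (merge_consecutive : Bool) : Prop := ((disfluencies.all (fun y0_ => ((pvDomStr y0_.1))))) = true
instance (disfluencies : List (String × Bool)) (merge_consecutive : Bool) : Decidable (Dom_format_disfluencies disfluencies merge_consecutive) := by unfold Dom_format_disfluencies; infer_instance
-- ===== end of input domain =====

-- B replaces A's indexed state machine by a direct recursive grouping of maximal
-- runs of disfluent words (objective: simpler); same return value everywhere.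

-- ===== PORT A =====
-- f"[{' '.join(g)}]"  (shared by both Pythons verbatim)
def pvBracket (g : List String) : String := "[" ++ PySem.Str.join " " g ++ "]"

-- the body of A's for-loop over enumerate(disfluencies); n = len(disfluencies)
def pvStepA (n : Int) (st : List String × List String × Bool) (q : Int × (String × Bool)) :
    List String × List String × Bool :=
  let result := st.1
  let current_group := st.2.1
  let last_was_disf := st.2.2
  let i := q.1
  let word := q.2.1
  let is_disf := q.2.2
  if is_disf then
    if !current_group.isEmpty || last_was_disf ||
       ["um", "uh"].contains (PySem.Str.stripChars (PySem.Str.lower word) ",.!?") ||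
       (decide (i > 0) && decide (i < n - 1)) then
      (result, current_group ++ [word], true)
    else
      ((if !current_group.isEmpty then result ++ [pvBracket current_group] else result),
       [word], true)
  else
    ((if !current_group.isEmpty then result ++ [pvBracket current_group] else result) ++ [word],
     [], false)

def format_disfluencies (disfluencies : List (String × Bool)) (merge_consecutive : Bool) : String :=
  if !merge_consecutive then
    PySem.Str.join " " (disfluencies.map (fun p => if p.2 then "[" ++ p.1 ++ "]" else p.1))
  else
    let st := (PySem.List.enumerate disfluencies).foldl
      (pvStepA (disfluencies.length : Int)) ([], [], false)
    let result := if !st.2.1.isEmpty then st.1 ++ [pvBracket st.2.1] else st.1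
    PySem.Str.join " " result

-- ===== PORT B =====
-- B's recursive helper `pieces`: emit each maximal run of disfluent words as one bracket
def pvPiecesB : List (String × Bool) → List String
  | [] => []
  | (word, is_disf) :: items' =>
    if is_disf then
      let run := items'.map Prod.fst
      let k := (items'.takeWhile (fun p => p.2)).length
      (pvBracket (word :: run.take k)) :: pvPiecesB (items'.drop k)
    else
      word :: pvPiecesB items'
termination_by l => l.length
decreasing_by
  all_goals simp
  all_goals omega

def format_disfluencies_alt (disfluencies : List (String × Bool)) (merge_consecutive : Bool) : String :=
  if !merge_consecutive then
    PySem.Str.join " " (disfluencies.map (fun p => if p.2 then "[" ++ p.1 ++ "]" else p.1))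
  else
    PySem.Str.join " " (pvPiecesB disfluencies)

-- ===== PRECONDITION & SPEC =====
def Spec_format_disfluencies (disfluencies : List (String × Bool)) (merge_consecutive : Bool) (out : String) : Prop := out = format_disfluencies_alt disfluencies merge_consecutive
instance (disfluencies : List (String × Bool)) (merge_consecutive : Bool) (out : String) : Decidable (Spec_format_disfluencies disfluencies merge_consecutive out) := by unfold Spec_format_disfluencies; infer_instance

-- ===== CLAIM (what is proved, stated in full; the proofs are below) =====
def Claim_equal_format_disfluencies : Prop := ∀ (disfluencies : List (String × Bool)) (merge_consecutive : Bool), Dom_format_disfluencies disfluencies merge_consecutive → Spec_format_disfluencies disfluencies merge_consecutive (format_disfluencies disfluencies merge_consecutive)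

-- ===== LEMMAS AND PROOFS =====
def pvFlush (g : List String) : List String := if !g.isEmpty then [pvBracket g] else []

def pvFinal (st : List String × List String × Bool) : List String :=
  if !st.2.1.isEmpty then st.1 ++ [pvBracket st.2.1] else st.1

-- reference grouping: pending group grp, remaining items
def pvGroup : List String → List (String × Bool) → List String
  | grp, [] => pvFlush grp
  | grp, (w, d) :: rest =>
    if d then pvGroup (grp ++ [w]) rest else pvFlush grp ++ (w :: pvGroup [] rest)

theorem pvFinal_eq (res grp b) : pvFinal (res, grp, b) = res ++ pvFlush grp := by
  unfold pvFinal pvFlush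
  cases grp <;> simp

theorem pvA_loop (l : List (String × Bool)) (n : Int) :
    ∀ (i : Int) (res grp : List String),
    pvFinal ((PySem.List.enumerate l i).foldl (pvStepA n) (res, grp, !grp.isEmpty)) =
      res ++ pvGroup grp l := by
  induction l with
  | nil => intro i res grp; simp [PySem.List.enumerate_nil, pvGroup, pvFinal_eq]
  | cons p rest ih =>
    intro i res grp
    obtain ⟨w, d⟩ := p
    rw [PySem.List.enumerate_cons, List.foldl_cons]
    cases d with
    | true =>
      have hstep : pvStepA n (res, grp, !grp.isEmpty) (i, (w, true)) =
          (res, grp ++ [w], !(grp ++ [w]).isEmpty) := by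
        cases grp <;> simp [pvStepA]
      rw [hstep, ih]
      simp [pvGroup]
    | false =>
      have hstep : pvStepA n (res, grp, !grp.isEmpty) (i, (w, false)) =
          (res ++ pvFlush grp ++ [w], [], !(List.isEmpty ([] : List String))) := by
        cases grp <;> simp [pvStepA, pvFlush]
      rw [hstep, ih]
      simp [pvGroup]

theorem pvGroup_run (l : List (String × Bool)) :
    ∀ grp, pvGroup grp l =
      pvFlush (grp ++ (l.takeWhile (fun p => p.2)).map Prod.fst) ++
        pvGroup [] (l.dropWhile (fun p => p.2)) := by
  induction l with
  | nil => intro grp; simp [pvGroup, pvFlush]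
  | cons p rest ih =>
    intro grp
    obtain ⟨w, d⟩ := p
    cases d with
    | true => simp [pvGroup, ih (grp ++ [w])]
    | false => simp [pvGroup, pvFlush]

theorem pv_take_length_takeWhile {α : Type} (p : α → Bool) (l : List α) :
    l.take (l.takeWhile p).length = l.takeWhile p := by
  induction l with
  | nil => simp
  | cons x xs ih =>
    by_cases h : p x <;> simp [h, ih]

theorem pv_drop_length_takeWhile {α : Type} (p : α → Bool) (l : List α) :
    l.drop (l.takeWhile p).length = l.dropWhile p := by
  induction l with
  | nil => simp
  | cons x xs ih =>
    by_cases h : p x <;> simp [List.dropWhile_cons, h, ih]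

theorem pvPiecesB_eq_pvGroup (l : List (String × Bool)) : pvPiecesB l = pvGroup [] l := by
  induction l using pvPiecesB.induct with
  | case1 => simp [pvPiecesB, pvGroup, pvFlush]
  | case2 w items' k ih =>
    rw [pv_drop_length_takeWhile] at ih
    have ht : (items'.map Prod.fst).take (items'.takeWhile (fun p => p.2)).length
        = (items'.takeWhile (fun p => p.2)).map Prod.fst := by
      rw [← List.map_take, pv_take_length_takeWhile]
    simp only [pvPiecesB, pvGroup, if_pos, pv_drop_length_takeWhile, ih, ht]
    rw [List.nil_append, pvGroup_run items' [w]]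
    simp [pvFlush]
  | case3 w d items' hnd ih =>
    simp only [pvPiecesB, pvGroup, Bool.not_eq_true] at *
    simp [hnd, ih, pvFlush]

-- ===== VERDICT (by name: the statement is the Claim_ definition above) =====
theorem format_disfluencies_spec : Claim_equal_format_disfluencies := by
  intro ds mc _
  unfold Spec_format_disfluencies format_disfluencies format_disfluencies_alt
  cases mc with
  | false => simp
  | true =>
    have h := pvA_loop ds (ds.length : Int) 0 [] []
    simp only [List.isEmpty_nil, Bool.not_true, List.nil_append] at h
    simp [pvPiecesB_eq_pvGroup, ← h, pvFinal]
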